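-- pv_equiv track=rewrite | github.com/ASSERT-KTH/Mokav | experiments/pynguin/c4b/return-lst/generated_tests/src_1545/0/src_1545.py | func
-- ===== SOURCE A (Python) =====
-- def func(*args):
-- 	ret_values = []
--
-- 	team = args[0]
-- 	d = 0
-- 	d_max = 0
-- 	current = team[0]
-- 	for i in team:
-- 	    if (i == current):
-- 	        d += 1
-- 	    else:
-- 	        if (d > d_max):
-- 	            d_max = d
-- 	        current = i
-- 	        d = 1
-- 	if (d > d_max):
-- 	    d_max = d
-- 	if (d_max >= 7):
-- 	    ret_values.append('YES')
-- 	else: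
-- 	    ret_values.append('NO')
--
-- 	return ret_values
-- ===== SOURCE B (Python) =====
-- def func(*args):
--     # Sliding 7-wide window over list suffixes instead of A's run-length
--     # state machine; on empty input A raises IndexError, this returns ['NO'].
--     team = args[0]
--     found = False
--     i = 0
--     while i < len(team):
--         if team[i:i+7] == team[i:i+1] * 7:
--             found = True
--             break
--         i += 1
--     return ['YES' if found else 'NO']
-- ===== Notes on version B (the rewrite author's own statement) =====
-- stated objective: alternative
-- what changed: replaces the current/d/d_max run-length state machine (with its final-run flush) by a sliding 7-element window check over list suffixes: xs[:7] == xs[:1]*7 detects a run of length 7 directly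
import Mathlib
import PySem

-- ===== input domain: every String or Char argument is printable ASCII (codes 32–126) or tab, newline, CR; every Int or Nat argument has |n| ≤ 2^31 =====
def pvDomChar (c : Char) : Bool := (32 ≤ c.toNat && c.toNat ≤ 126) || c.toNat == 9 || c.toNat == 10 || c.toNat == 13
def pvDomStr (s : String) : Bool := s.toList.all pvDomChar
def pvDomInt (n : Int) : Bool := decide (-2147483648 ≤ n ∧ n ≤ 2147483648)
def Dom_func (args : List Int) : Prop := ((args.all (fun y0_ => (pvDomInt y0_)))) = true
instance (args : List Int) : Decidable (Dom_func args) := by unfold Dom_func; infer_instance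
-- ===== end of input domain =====

-- B replaces A's run-length state machine by a sliding 7-element window over suffixes; return values agree on every nonempty list (A raises IndexError on []).

-- ===== PORT A =====
-- team = args (the single positional argument); team[0] raises IndexError on [] — excluded by Pre_func.
-- loop body of A, as a helper: (d, d_max, current) updated per element i
def stepA (st : Int × Int × Int) (i : Int) : Int × Int × Int :=
  if i = st.2.2 then (st.1 + 1, st.2.1, st.2.2)
  else (1, if st.1 > st.2.1 then st.1 else st.2.1, i)

def func (args : List Int) : List String :=
  match PySem.List.pyGet? args 0 with
  | none => []      -- unreachable under Pre_func (IndexError in Python)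
  | some c0 =>
    let s := args.foldl stepA (0, 0, c0)
    let dmax := if s.1 > s.2.1 then s.1 else s.2.1
    if dmax ≥ 7 then ["YES"] else ["NO"]

-- ===== PORT B =====
-- B's while loop, one step per suffix i: team[i:i+7] == team[i:i+1]*7  (the slice of 7 from i is List.take 7 of the suffix, exact; team[i:i+1]*7 on a nonempty suffix x::xs is List.replicate 7 x)
def hasRun7 : List Int → Bool
  | [] => false
  | x :: xs => ((x :: xs).take 7 == List.replicate 7 x) || hasRun7 xs

def func_alt (args : List Int) : List String :=
  if hasRun7 args then ["YES"] else ["NO"]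

-- ===== PRECONDITION & SPEC =====
def Pre_func (args : List Int) : Prop := args ≠ []
instance (args : List Int) : Decidable (Pre_func args) := by unfold Pre_func; infer_instance
def pvWitness_func : List Int := [1, 1, 2]

def Spec_func (args : List Int) (out : List String) : Prop := out = func_alt args
instance (args : List Int) (out : List String) : Decidable (Spec_func args out) := by unfold Spec_func; infer_instance

-- ===== CLAIM (what is proved, stated in full; the proofs are below) =====
def Claim_equal_func : Prop := ∀ (args : List Int), Dom_func args → Pre_func args → Spec_func args (func args)

-- ===== LEMMAS AND PROOFS =====

-- the maximal run length of (replicate d cur ++ ys), as A's machine tracks it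
def gRun (d : Int) (cur : Int) : List Int → Int
  | [] => d
  | y :: ys => if y = cur then gRun (d + 1) cur ys else max d (gRun 1 y ys)

-- A's fold, closed: the post-loop max(d, d_max) equals max dmax (gRun d cur ys)
theorem foldA_gRun (ys : List Int) : ∀ (d dmax cur : Int),
    (if (ys.foldl stepA (d, dmax, cur)).1 > (ys.foldl stepA (d, dmax, cur)).2.1
      then (ys.foldl stepA (d, dmax, cur)).1 else (ys.foldl stepA (d, dmax, cur)).2.1)
      = max dmax (gRun d cur ys) := by
  induction ys with
  | nil => intro d dmax cur; simp only [List.foldl_nil, gRun]; split <;> omega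
  | cons y ys ih =>
    intro d dmax cur
    simp only [List.foldl_cons, gRun, stepA]
    by_cases h : y = cur
    · simp only [if_pos h]
      exact ih (d + 1) dmax cur
    · simp only [if_neg h]
      rw [ih]
      have h1 : (if d > dmax then d else dmax) = max dmax d := by split <;> omega
      rw [h1, ← max_assoc]

theorem hasRun7_replicate_append (c : Int) (zs : List Int)
    (hz : ∀ z ∈ zs.head?, z ≠ c) : ∀ (n : Nat),
    hasRun7 (List.replicate n c ++ zs) = (decide (7 ≤ n) || hasRun7 zs) := by
  intro n
  induction n with
  | zero => simp
  | succ n ih =>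
    rw [List.replicate_succ, List.cons_append, hasRun7]
    have hcons : (c :: (List.replicate n c ++ zs)) = List.replicate (n+1) c ++ zs := by
      simp [List.replicate_succ]
    rw [hcons, ih]
    by_cases h7 : 7 ≤ n + 1
    · have htake : (List.replicate (n+1) c ++ zs).take 7 = List.replicate 7 c := by
        rw [List.take_append_of_le_length (by simp; omega), List.take_replicate]
        congr 1; omega
      simp [htake, h7]
    · have hne : (List.replicate (n+1) c ++ zs).take 7 ≠ List.replicate 7 c := by
        intro he
        cases zs with
        | nil =>
          simp only [List.append_nil, List.take_replicate] at he
          have := congrArg List.length he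
          simp at this; omega
        | cons z zs' =>
          have hzc : z ≠ c := hz z (by simp)
          have hv : ((List.replicate (n+1) c ++ z :: zs').take 7)[n+1]? = some z := by
            rw [List.getElem?_take_of_lt (by omega),
                List.getElem?_append_right (by simp)]
            simp
          rw [he, List.getElem?_replicate, if_pos (by omega)] at hv
          exact hzc (by simpa using hv.symm)
      have hb : ((List.replicate (n+1) c ++ zs).take 7 == List.replicate 7 c) = false :=
        beq_eq_false_iff_ne.mpr hne
      have h7n : ¬ 7 ≤ n := by omega
      rw [hb]
      simp [h7, h7n]

theorem gRun_hasRun7 (ys : List Int) : ∀ (cur : Int) (n : Nat), 1 ≤ n →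
    (gRun (n : Int) cur ys ≥ 7 ↔ hasRun7 (List.replicate n cur ++ ys) = true) := by
  induction ys with
  | nil =>
    intro cur n hn
    have h := hasRun7_replicate_append cur [] (by simp) n
    simp only [List.append_nil] at h
    simp only [List.append_nil, gRun]
    rw [h]
    simp [hasRun7]
  | cons y ys ih =>
    intro cur n hn
    rw [gRun]
    by_cases h : y = cur
    · subst h
      have hrep : List.replicate n y ++ y :: ys = List.replicate (n+1) y ++ ys := by
        rw [List.replicate_succ']
        simp
      rw [if_pos rfl, hrep]
      have hih := ih y (n + 1) (by omega)
      push_cast at hih ⊢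
      exact hih
    · rw [if_neg h,
        hasRun7_replicate_append cur (y :: ys) (fun z hzm => by simp at hzm; subst hzm; exact h) n]
      have hy := ih y 1 (le_refl 1)
      simp only [List.replicate_one, List.singleton_append, Nat.cast_one] at hy
      constructor
      · intro hge
        rcases le_max_iff.mp hge with hd | hrun
        · simp [show 7 ≤ n from by exact_mod_cast hd]
        · simp [hy.mp hrun]
      · intro hor
        simp only [Bool.or_eq_true, decide_eq_true_eq] at hor
        rcases hor with h7 | hrun
        · exact le_max_iff.mpr (Or.inl (by exact_mod_cast h7))
        · exact le_max_iff.mpr (Or.inr (hy.mpr hrun))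

theorem hasRun7_iff (x : Int) (xs : List Int) :
    (gRun 1 x xs ≥ 7 ↔ hasRun7 (x :: xs) = true) := by
  have h := gRun_hasRun7 xs x 1 (le_refl 1)
  simpa using h

-- ===== VERDICT (by name: the statement is the Claim_ definition above) =====
theorem func_spec : Claim_equal_func := by
  intro args _ hpre
  unfold Spec_func func func_alt
  cases args with
  | nil => exact absurd rfl hpre
  | cons x xs =>
    have h0 : PySem.List.pyGet? (x :: xs) 0 = some x := by
      simp [PySem.List.pyGet?, PySem.List.pyIdx?]
    rw [h0]
    have hstep : stepA (0, 0, x) x = (1, 0, x) := by simp [stepA]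
    simp only [List.foldl_cons, hstep]
    have hfold := foldA_gRun xs 1 0 x
    simp only [ge_iff_le]
    rw [hfold]
    have hiff : (7 ≤ max 0 (gRun 1 x xs)) ↔ hasRun7 (x :: xs) = true := by
      rw [← hasRun7_iff x xs]
      constructor
      · intro hc
        rcases le_max_iff.mp hc with hc | hc
        · omega
        · exact hc
      · intro hc
        exact le_max_iff.mpr (Or.inr hc)
    by_cases hr : hasRun7 (x :: xs) = true
    · rw [if_pos (hiff.mpr hr), if_pos hr]
    · rw [if_neg (fun hc => hr (hiff.mp hc)), if_neg hr]
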